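-- pv_equiv track=rewrite | github.com/kurazu/kaggle-store-sales | preprocessing/zeros.py | count_consecutive_zeros
-- ===== SOURCE A (Python) =====
-- from typing import Iterable, Sequence
--
-- def count_consecutive_zeros(sequence: Sequence[int]) -> Iterable[int]:
--     current = 0
--     for i in sequence:
--         if i == 0:
--             current += 1
--         else:
--             current = 0
--         yield current
-- ===== SOURCE B (Python) =====
-- from itertools import groupby
-- from typing import Iterable, Sequence
--
-- def count_consecutive_zeros(sequence: Sequence[int]) -> Iterable[int]:
--     out = []
--     for is_zero, group in groupby(sequence, key=lambda x: x == 0):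
--         n = sum(1 for _ in group)
--         out.extend(range(1, n + 1) if is_zero else [0] * n)
--     return out
-- ===== Notes on version B (the rewrite author's own statement) =====
-- stated objective: alternative
-- what changed: Replaces the element-by-element running counter with a two-stage run-length pass: groupby splits the sequence into maximal runs of zeros/nonzeros, each zero-run of length n emits range(1, n+1) and each nonzero-run emits n zeros.
import Mathlib
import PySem

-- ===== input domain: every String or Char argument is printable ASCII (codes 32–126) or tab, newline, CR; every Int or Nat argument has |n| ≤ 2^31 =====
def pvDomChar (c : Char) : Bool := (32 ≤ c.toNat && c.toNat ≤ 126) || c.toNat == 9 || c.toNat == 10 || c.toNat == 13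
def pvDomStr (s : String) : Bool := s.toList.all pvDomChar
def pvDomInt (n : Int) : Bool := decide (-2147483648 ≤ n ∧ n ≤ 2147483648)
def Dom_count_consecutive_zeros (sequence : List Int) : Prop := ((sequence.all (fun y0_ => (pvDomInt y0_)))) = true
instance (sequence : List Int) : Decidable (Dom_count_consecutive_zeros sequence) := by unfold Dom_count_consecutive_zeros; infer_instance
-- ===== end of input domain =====

-- B replaces A's running counter with a run-length decomposition (groupby + per-run closed form);
-- A is a generator, B returns a list: equivalence is about the yielded/returned sequence of values.

-- ===== PORT A =====
-- A: generator loop with mutable `current`, yielding after each element.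
def countCCZGo (current : Int) : List Int → List Int
  | [] => []
  | i :: rest =>
      let c := if i == 0 then current + 1 else 0
      c :: countCCZGo c rest

def count_consecutive_zeros (sequence : List Int) : List Int :=
  countCCZGo 0 sequence

-- ===== PORT B =====
-- groupby(sequence, key=λx. x == 0), ported exactly as a run-length encoder over the key:
-- each maximal run of equal keys becomes one (key, length) pair, in order.
def cczRuns : List Int → List (Bool × Nat)
  | [] => []
  | x :: xs =>
      match cczRuns xs with
      | (b, n) :: t => if (x == 0) == b then (b, n + 1) :: t else ((x == 0), 1) :: (b, n) :: t
      | [] => [((x == 0), 1)]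

-- one run's contribution: range(1, n+1) for a zero-run, [0] * n for a nonzero-run
def cczSeg (p : Bool × Nat) : List Int :=
  if p.1 then (List.range p.2).map (fun k : Nat => (k : Int) + 1) else List.replicate p.2 0

def count_consecutive_zeros_alt (sequence : List Int) : List Int :=
  (cczRuns sequence).flatMap cczSeg

-- ===== PRECONDITION & SPEC =====
def Spec_count_consecutive_zeros (sequence : List Int) (out : List Int) : Prop := out = count_consecutive_zeros_alt sequence
instance (sequence : List Int) (out : List Int) : Decidable (Spec_count_consecutive_zeros sequence out) := by unfold Spec_count_consecutive_zeros; infer_instance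

-- ===== CLAIM (what is proved, stated in full; the proofs are below) =====
def Claim_equal_count_consecutive_zeros : Prop := ∀ (sequence : List Int), Dom_count_consecutive_zeros sequence → Spec_count_consecutive_zeros sequence (count_consecutive_zeros sequence)

-- ===== LEMMAS AND PROOFS =====

-- decode of a run list whose possible leading zero-run is shifted by the incoming counter c
def cczDecodeC (c : Int) : List (Bool × Nat) → List Int
  | (true, n) :: t => (List.range n).map (fun k : Nat => (k : Int) + 1 + c) ++ t.flatMap cczSeg
  | rl => rl.flatMap cczSeg

theorem cczRuns_cons_head (y : Int) (ys : List Int) :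
    ∃ n t, cczRuns (y :: ys) = ((y == 0), n + 1) :: t := by
  cases h : cczRuns ys with
  | nil => exact ⟨0, [], by simp [cczRuns, h]⟩
  | cons p t =>
      obtain ⟨b, n⟩ := p
      by_cases hb : (y == 0) = b
      · exact ⟨n, t, by simp [cczRuns, h, hb]⟩
      · refine ⟨0, (b, n) :: t, ?_⟩
        simp only [cczRuns, h]
        rw [if_neg (by simp [hb])]

theorem cczDecodeC_zero (rl : List (Bool × Nat)) :
    cczDecodeC 0 rl = rl.flatMap cczSeg := by
  cases rl with
  | nil => rfl
  | cons p t =>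
      obtain ⟨b, n⟩ := p
      cases b with
      | false => rfl
      | true => simp [cczDecodeC, cczSeg, List.flatMap_cons]

theorem cczDecodeC_true_succ (c : Int) (n : Nat) (t : List (Bool × Nat)) :
    cczDecodeC c ((true, n + 1) :: t) = (c + 1) :: cczDecodeC (c + 1) ((true, n) :: t) := by
  simp only [cczDecodeC, List.range_succ_eq_map, List.map_cons, List.map_map, List.cons_append]
  congr 1
  · push_cast; ring
  · congr 1
    apply List.map_congr_left; intro k _; simp [Function.comp]; ring

theorem cczDecodeC_false (c : Int) (n : Nat) (t : List (Bool × Nat)) :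
    cczDecodeC c ((false, n) :: t) = List.replicate n 0 ++ t.flatMap cczSeg := by
  simp [cczDecodeC, cczSeg, List.flatMap_cons]

theorem countCCZGo_eq_decode (xs : List Int) : ∀ c : Int,
    countCCZGo c xs = cczDecodeC c (cczRuns xs) := by
  induction xs with
  | nil => intro c; rfl
  | cons x xs ih =>
      intro c
      have hstep : countCCZGo c (x :: xs)
          = (if x == 0 then c + 1 else 0) :: countCCZGo (if x == 0 then c + 1 else 0) xs := rfl
      cases xs with
      | nil =>
          by_cases hx : x = 0
          · simp [countCCZGo, cczRuns, cczDecodeC, hx, List.range_succ]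
            ring
          · simp [countCCZGo, cczRuns, cczDecodeC, cczSeg, hx]
      | cons y ys =>
          obtain ⟨n, t, hruns⟩ := cczRuns_cons_head y ys
          have hrec : cczRuns (x :: y :: ys)
              = if ((x == 0) == (y == 0)) = true then ((y == 0), n + 2) :: t
                else ((x == 0), 1) :: ((y == 0), n + 1) :: t := by
            rw [cczRuns, hruns]
          by_cases hx : x = 0 <;> by_cases hy : y = 0
          · -- both zero: merged zero-run
            have hxb : (x == 0) = true := by simp [hx]
            have hyb : (y == 0) = true := by simp [hy]
            rw [hstep, if_pos hxb, ih (c + 1), hruns, hrec, hyb, hxb]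
            simp only [beq_self_eq_true, if_pos]
            rw [show n + 2 = (n + 1) + 1 from rfl, cczDecodeC_true_succ c (n + 1) t]
          · -- x zero, y nonzero: new zero-run of length 1 in front
            have hxb : (x == 0) = true := by simp [hx]
            have hyb : (y == 0) = false := by simp [hy]
            rw [hstep, if_pos hxb, ih (c + 1), hruns, hrec, hyb, hxb]
            rw [if_neg (by simp)]
            rw [show (1 : Nat) = 0 + 1 from rfl,
              cczDecodeC_true_succ c 0 ((false, n + 1) :: t)]
            simp [cczDecodeC, cczSeg]
          · -- x nonzero, y zero: counter resets before the zero-run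
            have hxb : (x == 0) = false := by simp [hx]
            have hyb : (y == 0) = true := by simp [hy]
            rw [hstep, if_neg (by simp [hxb]), ih 0, hruns, hrec, hyb, hxb]
            rw [if_neg (by simp)]
            rw [cczDecodeC_false, cczDecodeC_zero]
            simp [cczSeg, List.flatMap_cons]
          · -- both nonzero: merged nonzero-run
            have hxb : (x == 0) = false := by simp [hx]
            have hyb : (y == 0) = false := by simp [hy]
            rw [hstep, if_neg (by simp [hxb]), ih 0, hruns, hrec, hyb, hxb]
            simp only [beq_self_eq_true, if_pos]
            rw [cczDecodeC_false, cczDecodeC_false]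
            simp [List.replicate_succ]

-- ===== VERDICT =====
theorem count_consecutive_zeros_spec : Claim_equal_count_consecutive_zeros := by
  intro sequence _
  unfold Spec_count_consecutive_zeros count_consecutive_zeros count_consecutive_zeros_alt
  rw [countCCZGo_eq_decode, cczDecodeC_zero]
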